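-- pv_equiv track=rewrite | github.com/mtbiegel/alcohol_label_verification | backend/src/updated_label_ocr.py | classify_class_type
-- ===== SOURCE A (Python) =====
-- SPIRIT_TYPES = [
--     'whisky', 'whiskey', 'bourbon', 'vodka', 'rum', 'gin',
--     'tequila', 'brandy', 'rye', 'scotch', 'cognac', 'mezcal',
--     'brandy', 'liqueur', 'absinthe', 'vermouth', 'malt'
-- ]
--
-- SPIRIT_DESCRIPTORS = [
--     'straight', 'single', 'barrel', 'double', 'aged', 'small',
--     'batch', 'blended', 'pure', 'premium', 'rare', 'reserve',
--     'select', 'special', 'cask', 'strength', 'malt', 'grain',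
--     'kentucky', 'tennessee', 'irish', 'japanese', 'canadian',
--     'american', 'extra', 'anejo', 'reposado', 'blanco'
-- ]
--
-- def classify_class_type(text_list: list) -> str:
--     """
--     Extract class/type by finding spirit keywords and collecting their descriptors.
--     e.g., 'STRAIGHT RYE WHISKY' or 'SINGLE BARREL KENTUCKY BOURBON'
--     """
--     text_lower_list = [t.lower().strip() for t in text_list]
--
--     # Find all spirit keyword positions
--     spirit_positions = [
--         i for i, t in enumerate(text_lower_list)
--         if t in SPIRIT_TYPES
--     ]
--
--     if not spirit_positions:
--         return ""
--
--     # For each spirit keyword found, collect surrounding context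
--     # Take the one with the most descriptor context (most complete type string)
--     best_result = ""
--
--     for spirit_idx in spirit_positions:
--         parts = []
--
--         # Look back up to 4 words for descriptors
--         lookback = min(4, spirit_idx)
--         for i in range(spirit_idx - lookback, spirit_idx):
--             word = text_list[i].strip()
--             if word.lower() in SPIRIT_DESCRIPTORS or word.lower() in SPIRIT_TYPES:
--                 parts.append(word)
--             else:
--                 # Reset if we hit a non-descriptor — don't want to grab brand name
--                 parts = []
--
--         # Add the spirit word itself
--         parts.append(text_list[spirit_idx].strip())
--
--         # Look ahead 1 word in case of "WHISKY DISTILLED" etc.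
--         if spirit_idx + 1 < len(text_list):
--             next_word = text_list[spirit_idx + 1].strip()
--             if next_word.lower() in SPIRIT_TYPES or next_word.lower() in SPIRIT_DESCRIPTORS:
--                 parts.append(next_word)
--
--         candidate = ' '.join(parts)
--
--         # Keep the most descriptive result
--         if len(candidate) > len(best_result):
--             best_result = candidate
--
--     return best_result
-- ===== SOURCE B (Python) =====
-- SPIRIT_TYPES = [
--     'whisky', 'whiskey', 'bourbon', 'vodka', 'rum', 'gin',
--     'tequila', 'brandy', 'rye', 'scotch', 'cognac', 'mezcal',
--     'brandy', 'liqueur', 'absinthe', 'vermouth', 'malt'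
-- ]
--
-- SPIRIT_DESCRIPTORS = [
--     'straight', 'single', 'barrel', 'double', 'aged', 'small',
--     'batch', 'blended', 'pure', 'premium', 'rare', 'reserve',
--     'select', 'special', 'cask', 'strength', 'malt', 'grain',
--     'kentucky', 'tennessee', 'irish', 'japanese', 'canadian',
--     'american', 'extra', 'anejo', 'reposado', 'blanco'
-- ]
--
-- _KEY = set(SPIRIT_DESCRIPTORS) | set(SPIRIT_TYPES)
--
--
-- def classify_class_type(text_list: list) -> str:
--     """Streaming state machine: one pass, no indexing.
--
--     State: `run` is the current contiguous run of keyword words (stripped,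
--     original case); `pending` is a candidate built when a spirit word is seen,
--     resolved one token later (so the one-word lookahead needs no indexing)."""
--     best = ""
--     run = []
--     pending = None
--     for tok in text_list:
--         w = tok.strip()
--         lw = w.lower()
--         is_key = lw in _KEY
--         if pending is not None:
--             cand = pending + ' ' + w if is_key else pending
--             if len(cand) > len(best):
--                 best = cand
--             pending = None
--         if lw in SPIRIT_TYPES:
--             pending = ' '.join(run[-4:] + [w])
--         if is_key:
--             run.append(w)
--         else:
--             run = []
--     if pending is not None and len(pending) > len(best):
--         best = pending
--     return best
-- ===== Notes on version B (the rewrite author's own statement) =====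
-- stated objective: alternative
-- what changed: A finds all spirit positions, then for each one re-derives the context by an indexed 4-word lookback fold plus an indexed one-word lookahead; B is a single streaming state machine over the tokens with no indexing at all: it carries the current contiguous keyword run and a pending candidate that is resolved one token later, so the lookback window and the lookahead both fall out of the carried state.
import Mathlib
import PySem

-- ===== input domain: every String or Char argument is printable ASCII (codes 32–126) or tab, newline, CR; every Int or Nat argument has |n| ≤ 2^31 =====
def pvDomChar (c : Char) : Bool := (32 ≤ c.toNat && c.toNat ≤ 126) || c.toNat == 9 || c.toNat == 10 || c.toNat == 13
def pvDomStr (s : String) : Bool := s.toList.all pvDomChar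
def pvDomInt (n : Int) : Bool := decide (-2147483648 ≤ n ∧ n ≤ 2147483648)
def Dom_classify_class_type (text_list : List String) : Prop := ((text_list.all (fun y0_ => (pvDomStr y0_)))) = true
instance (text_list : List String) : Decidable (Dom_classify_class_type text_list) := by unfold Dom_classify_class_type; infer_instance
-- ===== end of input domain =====

-- B replaces A's per-spirit window recomputation (4-word lookback fold + indexed lookahead)
-- by a single streaming state machine over the tokens with no indexing at all:
-- it carries the current contiguous keyword run and a pending candidate resolved one
-- token later (objective: alternative).

-- ===== PORT A =====
def pvTypes : List String :=
  ["whisky", "whiskey", "bourbon", "vodka", "rum", "gin",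
   "tequila", "brandy", "rye", "scotch", "cognac", "mezcal",
   "brandy", "liqueur", "absinthe", "vermouth", "malt"]

def pvDescr : List String :=
  ["straight", "single", "barrel", "double", "aged", "small",
   "batch", "blended", "pure", "premium", "rare", "reserve",
   "select", "special", "cask", "strength", "malt", "grain",
   "kentucky", "tennessee", "irish", "japanese", "canadian",
   "american", "extra", "anejo", "reposado", "blanco"]

-- body of A's 'for spirit_idx in spirit_positions' loop
def pvStepA (text_list : List String) (best_result : String) (spirit_idx : Nat) : String :=
  let lookback := min 4 spirit_idx
  let parts := (List.range' (spirit_idx - lookback) lookback).foldl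
    (fun parts i =>
      let word := PySem.Str.strip (text_list.getD i "")
      if PySem.Str.lower word ∈ pvDescr ∨ PySem.Str.lower word ∈ pvTypes
      then parts ++ [word] else []) []
  let parts := parts ++ [PySem.Str.strip (text_list.getD spirit_idx "")]
  let parts :=
    if spirit_idx + 1 < text_list.length then
      let next_word := PySem.Str.strip (text_list.getD (spirit_idx + 1) "")
      if PySem.Str.lower next_word ∈ pvTypes ∨ PySem.Str.lower next_word ∈ pvDescr
      then parts ++ [next_word] else parts
    else parts
  let candidate := PySem.Str.join " " parts
  if PySem.Str.len best_result < PySem.Str.len candidate then candidate else best_result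

def classify_class_type (text_list : List String) : String :=
  let text_lower_list := text_list.map (fun t => PySem.Str.strip (PySem.Str.lower t))
  let spirit_positions :=
    text_lower_list.zipIdx.filterMap (fun p => if p.1 ∈ pvTypes then some p.2 else none)
  if spirit_positions = [] then ""
  else spirit_positions.foldl (pvStepA text_list) ""

-- ===== PORT B =====
-- _KEY = set(SPIRIT_DESCRIPTORS) | set(SPIRIT_TYPES)
def pvKey : PySem.Set String := PySem.Set.union (PySem.Set.ofList pvDescr) (PySem.Set.ofList pvTypes)

-- one iteration of B's 'for tok in text_list' loop; state = (best, run, pending)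
def pvStepB (s : String × List String × Option String) (tok : String) :
    String × List String × Option String :=
  let w := PySem.Str.strip tok
  let lw := PySem.Str.lower w
  let isKey := lw ∈ pvKey
  let best :=
    match s.2.2 with
    | some p =>
        let cand := if isKey then PySem.Str.join " " [p, w] else p
        if PySem.Str.len s.1 < PySem.Str.len cand then cand else s.1
    | none => s.1
  let pending :=
    if lw ∈ pvTypes then
      some (PySem.Str.join " " (PySem.List.slice s.2.1 (some (-4)) none ++ [w]))
    else none
  let run := if isKey then s.2.1 ++ [w] else []
  (best, run, pending)

def classify_class_type_alt (text_list : List String) : String :=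
  let st := text_list.foldl pvStepB ("", [], none)
  match st.2.2 with
  | some p => if PySem.Str.len st.1 < PySem.Str.len p then p else st.1
  | none => st.1

-- ===== PRECONDITION & SPEC =====
def Spec_classify_class_type (text_list : List String) (out : String) : Prop := out = classify_class_type_alt text_list
instance (text_list : List String) (out : String) : Decidable (Spec_classify_class_type text_list out) := by unfold Spec_classify_class_type; infer_instance

-- ===== CLAIM (what is proved, stated in full; the proofs are below) =====
def Claim_equal_classify_class_type : Prop := ∀ (text_list : List String), Dom_classify_class_type text_list → Spec_classify_class_type text_list (classify_class_type text_list)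

-- ===== LEMMAS AND PROOFS =====

-- proof-side vocabulary --------------------------------------------------------
-- lowered stripped token at index i
def pvLw (xs : List String) (i : Nat) : String := PySem.Str.lower (PySem.Str.strip (xs.getD i ""))

-- maximal contiguous keyword run ending just before position n (B's `run` after n tokens)
def pvKrun (xs : List String) : Nat → List String
  | 0 => []
  | n + 1 => if pvLw xs n ∈ pvKey then pvKrun xs n ++ [PySem.Str.strip (xs.getD n "")] else []

-- B's `pending` after n tokens
def pvPend (xs : List String) : Nat → Option String
  | 0 => none
  | m + 1 =>
    if pvLw xs m ∈ pvTypes then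
      some (PySem.Str.join " "
        ((pvKrun xs m).drop ((pvKrun xs m).length - 4) ++ [PySem.Str.strip (xs.getD m "")]))
    else none

-- spirit positions among the first n tokens
def pvPos (xs : List String) (n : Nat) : List Nat :=
  (List.range n).filter (fun i => pvLw xs i ∈ pvTypes)

-- A's best over the spirits among the first n tokens
def pvBest (xs : List String) (n : Nat) : String := (pvPos xs n).foldl (pvStepA xs) ""

-- backward break-run (proof helper for the window characterisation)
def pvRun (xs : List String) : Nat → Nat → List String
  | _, 0 => []
  | j, k + 1 =>
    let w := PySem.Str.strip (xs.getD j "")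
    if PySem.Str.lower w ∈ pvKey then w :: pvRun xs (j - 1) k else []

-- membership facts -------------------------------------------------------------
theorem pv_key_iff (w : String) : w ∈ pvKey ↔ (w ∈ pvDescr ∨ w ∈ pvTypes) := by
  unfold pvKey
  rw [PySem.Set.mem_union]
  rw [PySem.Set.mem_ofList, PySem.Set.mem_ofList]

-- lower/strip commute ----------------------------------------------------------
theorem pv_isspace_nonspace (n : Nat) (h1 : 65 ≤ n) (h2 : n ≤ 122) :
    (decide (n = 32) || decide (9 ≤ n) && decide (n ≤ 13) || decide (28 ≤ n) && decide (n ≤ 31) || decide (n = 133) ||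
      decide (n = 160) || decide (n = 5760) || decide (8192 ≤ n) && decide (n ≤ 8202) || decide (n = 8232) ||
      decide (n = 8233) || decide (n = 8239) || decide (n = 8287) || decide (n = 12288)) = false := by
  simp only [Bool.or_eq_false_iff, Bool.and_eq_false_iff, decide_eq_false_iff_not]
  refine ⟨⟨⟨⟨⟨⟨⟨⟨⟨⟨⟨?_, ?_⟩, ?_⟩, ?_⟩, ?_⟩, ?_⟩, ?_⟩, ?_⟩, ?_⟩, ?_⟩, ?_⟩, ?_⟩ <;> omega

theorem pv_isspace_lowerChar (c : Char) :
    PySem.Chars.isspace (PySem.Chars.lowerChar c) = PySem.Chars.isspace c := by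
  unfold PySem.Chars.lowerChar PySem.Chars.isupper
  split
  · next h =>
    rw [Bool.and_eq_true, decide_eq_true_iff, decide_eq_true_iff] at h
    have h1 : 65 ≤ c.toNat := h.1
    have h2 : c.toNat ≤ 90 := h.2
    have hv : (Char.ofNat (c.toNat + 32)).toNat = c.toNat + 32 := by
      have : c.toNat + 32 < 55296 := by omega
      simp [Char.ofNat, Nat.isValidChar, this]
    unfold PySem.Chars.isspace
    rw [hv, pv_isspace_nonspace _ (by omega) (by omega),
        pv_isspace_nonspace _ (by omega) (by omega)]
  · rfl

theorem pv_dropWhile_lower (l : List Char) :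
    List.dropWhile PySem.Chars.isspace (PySem.Chars.lower l)
      = PySem.Chars.lower (List.dropWhile PySem.Chars.isspace l) := by
  unfold PySem.Chars.lower
  rw [List.dropWhile_map]
  have h : (PySem.Chars.isspace ∘ PySem.Chars.lowerChar) = PySem.Chars.isspace :=
    funext pv_isspace_lowerChar
  rw [h]

theorem pv_chars_sl (l : List Char) :
    PySem.Chars.strip (PySem.Chars.lower l) = PySem.Chars.lower (PySem.Chars.strip l) := by
  unfold PySem.Chars.strip PySem.Chars.lstrip PySem.Chars.rstrip
  rw [pv_dropWhile_lower]
  rw [show ∀ m, (PySem.Chars.lower m).reverse = PySem.Chars.lower m.reverse from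
      fun m => by unfold PySem.Chars.lower; rw [List.map_reverse]]
  rw [pv_dropWhile_lower]
  unfold PySem.Chars.lower
  rw [List.map_reverse]

theorem pv_strip_lower (s : String) :
    PySem.Str.strip (PySem.Str.lower s) = PySem.Str.lower (PySem.Str.strip s) := by
  unfold PySem.Str.strip PySem.Str.lower
  simp [pv_chars_sl]

-- positions --------------------------------------------------------------------
theorem pv_pos_gen (h : String → String) (c : String → Prop) [DecidablePred c] :
    ∀ (xs : List String) (n : Nat),
    ((xs.map h).zipIdx n).filterMap (fun p => if c p.1 then some p.2 else none)
      = (xs.zipIdx n).filterMap (fun p => if c (h p.1) then some p.2 else none) := by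
  intro xs
  induction xs with
  | nil => intro n; rfl
  | cons x xs ih =>
    intro n
    by_cases hc : c (h x) <;> simp [List.zipIdx_cons, hc, ih]

theorem pv_pos_eq (xs : List String) :
    (xs.zipIdx.filterMap fun p =>
        if PySem.Str.lower (PySem.Str.strip p.1) ∈ pvTypes then some p.2 else none)
      = pvPos xs xs.length := by
  induction xs using List.reverseRecOn with
  | nil => rfl
  | append_singleton ys y ih =>
    rw [List.zipIdx_append, List.filterMap_append]
    unfold pvPos
    rw [List.length_append, List.length_singleton, List.range_succ, List.filter_append]
    have h1 : (List.range ys.length).filter (fun i => pvLw (ys ++ [y]) i ∈ pvTypes)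
        = (List.range ys.length).filter (fun i => pvLw ys i ∈ pvTypes) := by
      apply List.filter_congr
      intro i hi
      rw [List.mem_range] at hi
      simp [pvLw, List.getElem?_append_left hi]
    have h2 : (List.zipIdx [y] (0 + ys.length)).filterMap
          (fun p => if PySem.Str.lower (PySem.Str.strip p.1) ∈ pvTypes then some p.2 else none)
        = [ys.length].filter (fun i => pvLw (ys ++ [y]) i ∈ pvTypes) := by
      simp only [List.zipIdx_singleton, List.filterMap, Nat.zero_add]
      have hy : pvLw (ys ++ [y]) ys.length = PySem.Str.lower (PySem.Str.strip y) := by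
        simp [pvLw, List.getD]
      simp [List.filter, hy]
      split <;> simp_all
    rw [h1, h2, ih]
    rfl

-- window = last-4 of the keyword run -------------------------------------------
theorem pv_win_eq (xs : List String) : ∀ (k j : Nat) (acc : List String),
    (List.range' j k).foldl
      (fun parts i =>
        let word := PySem.Str.strip (xs.getD i "")
        if PySem.Str.lower word ∈ pvDescr ∨ PySem.Str.lower word ∈ pvTypes
        then parts ++ [word] else []) acc
    = (if ∀ i ∈ List.range' j k,
          (PySem.Str.lower (PySem.Str.strip (xs.getD i "")) ∈ pvDescr ∨
           PySem.Str.lower (PySem.Str.strip (xs.getD i "")) ∈ pvTypes)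
       then acc else [])
      ++ (pvRun xs (j + k - 1) k).reverse := by
  intro k
  induction k with
  | zero => intro j acc; simp [pvRun]
  | succ k ih =>
    intro j acc
    have hcat : List.range' j (k + 1) = List.range' j k ++ [j + k] := by
      simpa using List.range'_concat (s := j) (n := k) (step := 1)
    have hidx : j + (k + 1) - 1 = j + k := by omega
    rw [hcat, List.foldl_append, ih, hidx]
    by_cases hm : PySem.Str.lower (PySem.Str.strip (xs[j + k]?.getD "")) ∈ pvDescr ∨
                  PySem.Str.lower (PySem.Str.strip (xs[j + k]?.getD "")) ∈ pvTypes
    · simp [pvRun, pv_key_iff, hm, or_comm, List.append_assoc, or_imp, forall_and]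
    · simp [pvRun, pv_key_iff, hm, or_comm, or_imp, forall_and]

theorem pv_krun_len (xs : List String) : ∀ m, (pvKrun xs m).length ≤ m := by
  intro m
  induction m with
  | zero => simp [pvKrun]
  | succ m ih => unfold pvKrun; split <;> simp <;> omega

theorem pv_run_krun (xs : List String) :
    ∀ (k m : Nat), k ≤ m →
      (pvRun xs (m - 1) k).reverse = (pvKrun xs m).drop ((pvKrun xs m).length - k) := by
  intro k
  induction k with
  | zero => intro m _; simp [pvRun]
  | succ k ih =>
    intro m hm
    obtain ⟨m', rfl⟩ : ∃ m', m = m' + 1 := ⟨m - 1, by omega⟩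
    show (pvRun xs m' (k+1)).reverse = _
    rw [pvRun]
    by_cases hk : pvLw xs m' ∈ pvKey
    · have hkr : pvKrun xs (m' + 1) = pvKrun xs m' ++ [PySem.Str.strip (xs.getD m' "")] := by
        rw [pvKrun, if_pos hk]
      rw [hkr]
      have hw : PySem.Str.lower (PySem.Str.strip (xs.getD m' "")) ∈ pvKey := hk
      rw [if_pos hw, List.reverse_cons, ih m' (by omega)]
      rw [List.length_append, List.length_singleton,
          List.drop_append_of_le_length (by omega),
          show (pvKrun xs m').length + 1 - (k+1) = (pvKrun xs m').length - k by omega]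
    · have hkr : pvKrun xs (m' + 1) = [] := by
        rw [pvKrun, if_neg hk]
      rw [hkr]
      have hw : ¬ PySem.Str.lower (PySem.Str.strip (xs.getD m' "")) ∈ pvKey := hk
      rw [if_neg hw]
      simp

-- A's step, rewritten through the run ------------------------------------------
def pvP (xs : List String) (m : Nat) : String :=
  PySem.Str.join " "
    ((pvKrun xs m).drop ((pvKrun xs m).length - 4) ++ [PySem.Str.strip (xs.getD m "")])

theorem pv_intercalate_snoc (sep b : List Char) :
    ∀ (L : List (List Char)), L ≠ [] →
      sep.intercalate (L ++ [b]) = sep.intercalate L ++ sep ++ b := by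
  intro L
  induction L with
  | nil => intro h; exact absurd rfl h
  | cons a L ih =>
    intro _
    cases L with
    | nil => simp [List.intercalate]
    | cons c L =>
      have h2 := ih (by simp)
      simp only [List.cons_append] at h2
      have h3 : ∀ M, sep.intercalate (a :: c :: M) = a ++ sep ++ sep.intercalate (c :: M) := by
        intro M; simp [List.intercalate, List.intersperse]
      simp only [List.cons_append]
      rw [h3 (L ++ [b]), h3 L, h2]
      simp [List.append_assoc]

-- join of a snoc ---------------------------------------------------------------

theorem pv_join_snoc (parts : List String) (w : String) (h : parts ≠ []) :
    PySem.Str.join " " (parts ++ [w]) = PySem.Str.join " " [PySem.Str.join " " parts, w] := by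
  unfold PySem.Str.join PySem.Chars.join
  simp only [List.map_append, List.map_cons, List.map_nil, String.toList_ofList]
  rw [pv_intercalate_snoc _ _ _ (by simpa using h)]
  simp [List.intercalate]


theorem pv_best_succ (xs : List String) (n : Nat) :
    pvBest xs (n + 1)
      = if pvLw xs n ∈ pvTypes then pvStepA xs (pvBest xs n) n else pvBest xs n := by
  unfold pvBest pvPos
  rw [List.range_succ, List.filter_append, List.foldl_append]
  by_cases h : pvLw xs n ∈ pvTypes <;> simp [h]

-- the streaming invariant ------------------------------------------------------

theorem pv_stepA_char (xs : List String) (b : String) (m : Nat) :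
    pvStepA xs b m =
      (let cand :=
        if m + 1 < xs.length ∧ pvLw xs (m + 1) ∈ pvKey then
          PySem.Str.join " " [pvP xs m, PySem.Str.strip (xs.getD (m + 1) "")]
        else pvP xs m
      if PySem.Str.len b < PySem.Str.len cand then cand else b) := by
  have hwin := pv_win_eq xs (min 4 m) (m - min 4 m) []
  rw [show m - min 4 m + min 4 m - 1 = m - 1 by omega] at hwin
  rw [ite_self, List.nil_append] at hwin
  have hrun := pv_run_krun xs (min 4 m) m (Nat.min_le_right 4 m)
  have hlen := pv_krun_len xs m
  rw [show (pvKrun xs m).length - min 4 m = (pvKrun xs m).length - 4 by omega] at hrun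
  show (let lookback := min 4 m;
    let parts := (List.range' (m - lookback) lookback).foldl
      (fun parts i =>
        let word := PySem.Str.strip (xs.getD i "")
        if PySem.Str.lower word ∈ pvDescr ∨ PySem.Str.lower word ∈ pvTypes
        then parts ++ [word] else []) [];
    let parts := parts ++ [PySem.Str.strip (xs.getD m "")];
    let parts :=
      if m + 1 < xs.length then
        let next_word := PySem.Str.strip (xs.getD (m + 1) "")
        if PySem.Str.lower next_word ∈ pvTypes ∨ PySem.Str.lower next_word ∈ pvDescr
        then parts ++ [next_word] else parts
      else parts;
    let candidate := PySem.Str.join " " parts;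
    if PySem.Str.len b < PySem.Str.len candidate then candidate else b) = _
  simp only []
  rw [hwin, hrun]
  by_cases h1 : m + 1 < xs.length
  · rw [if_pos h1]
    by_cases h2 : pvLw xs (m + 1) ∈ pvKey
    · have h2' : PySem.Str.lower (PySem.Str.strip (xs.getD (m+1) "")) ∈ pvTypes ∨
                 PySem.Str.lower (PySem.Str.strip (xs.getD (m+1) "")) ∈ pvDescr := by
        rcases (pv_key_iff _).1 h2 with h | h
        · exact Or.inr h
        · exact Or.inl h
      rw [if_pos h2',
          if_pos (show m + 1 < xs.length ∧ pvLw xs (m + 1) ∈ pvKey from ⟨h1, h2⟩)]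
      rw [pv_join_snoc _ _ (by simp)]
      rfl
    · have h2' : ¬ (PySem.Str.lower (PySem.Str.strip (xs.getD (m+1) "")) ∈ pvTypes ∨
                 PySem.Str.lower (PySem.Str.strip (xs.getD (m+1) "")) ∈ pvDescr) := by
        intro hc
        exact h2 ((pv_key_iff _).2 hc.symm)
      rw [if_neg h2',
          if_neg (show ¬ (m + 1 < xs.length ∧ pvLw xs (m + 1) ∈ pvKey) from
            fun hc => h2 hc.2)]
      rfl
  · rw [if_neg h1,
        if_neg (show ¬ (m + 1 < xs.length ∧ pvLw xs (m + 1) ∈ pvKey) from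
          fun hc => h1 hc.1)]
    rfl

set_option maxRecDepth 8192 in
set_option maxHeartbeats 1000000 in
theorem pv_inv (xs : List String) :
    ∀ k, k ≤ xs.length →
      (xs.take k).foldl pvStepB ("", [], none)
        = (pvBest xs (k - 1), pvKrun xs k, pvPend xs k) := by
  intro k
  induction k with
  | zero =>
    intro _
    simp [pvBest, pvPos, pvKrun, pvPend]
  | succ k ih =>
    intro h
    have hk : k < xs.length := by omega
    rw [List.take_add_one, List.getElem?_eq_getElem hk]
    simp only [Option.toList_some]
    rw [List.foldl_append, ih (by omega)]
    simp only [List.foldl_cons, List.foldl_nil]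
    have hget : xs.getD k "" = xs[k] := List.getD_eq_getElem xs "" hk
    cases k with
    | zero =>
      rw [show pvPend xs 0 = none from rfl, pvStepB]
      show ((pvBest xs 0 : String),
            (if PySem.Str.lower (PySem.Str.strip xs[0]) ∈ pvKey
             then pvKrun xs 0 ++ [PySem.Str.strip xs[0]] else []),
            (if PySem.Str.lower (PySem.Str.strip xs[0]) ∈ pvTypes
             then some (PySem.Str.join " "
               (PySem.List.slice (pvKrun xs 0) (some (-4)) none ++ [PySem.Str.strip xs[0]]))
             else none))
          = (pvBest xs 0, pvKrun xs (0 + 1), pvPend xs (0 + 1))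
      rw [Prod.mk.injEq, Prod.mk.injEq]
      refine ⟨rfl, ?_, ?_⟩
      · rw [pvKrun, pvKrun, pvKrun]
        unfold pvLw
        rw [hget]
      · rw [pvPend, pvKrun]
        unfold pvLw
        rw [hget, PySem.List.slice_from_neg_ofNat _ 4 (by norm_num)]
    | succ k' =>
      have hk' : pvPend xs (k' + 1)
          = if pvLw xs k' ∈ pvTypes then some (pvP xs k') else none := rfl
      by_cases hs : pvLw xs k' ∈ pvTypes
      · -- the spirit at k' is resolved now, with its one-word lookahead
        rw [hk', if_pos hs]
        simp only [Nat.add_sub_cancel]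
        generalize hb : pvBest xs k' = b
        generalize hr : pvKrun xs (k' + 1) = r
        generalize hp : pvP xs k' = p
        rw [pvStepB]
        show ((let w := PySem.Str.strip xs[k' + 1]
               let lw := PySem.Str.lower w
               let isKey := lw ∈ pvKey
               let best :=
                 let cand := if isKey then PySem.Str.join " " [p, w] else p
                 if PySem.Str.len b < PySem.Str.len cand then cand else b
               let pending :=
                 if lw ∈ pvTypes then
                   some (PySem.Str.join " "
                     (PySem.List.slice r (some (-4)) none ++ [PySem.Str.strip xs[k' + 1]]))
                 else none
               let run := if isKey then r ++ [PySem.Str.strip xs[k' + 1]] else []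
               (best, run, pending)))
          = (pvBest xs (k' + 1), pvKrun xs (k' + 1 + 1), pvPend xs (k' + 1 + 1))
        rw [Prod.mk.injEq, Prod.mk.injEq]
        refine ⟨?_, ?_, ?_⟩
        · -- best
          rw [pv_best_succ, if_pos hs, hb, pv_stepA_char]
          by_cases hkey : pvLw xs (k' + 1) ∈ pvKey
          · rw [if_pos (show k' + 1 < xs.length ∧ pvLw xs (k' + 1) ∈ pvKey from ⟨hk, hkey⟩)]
            unfold pvLw at hkey
            rw [hget] at hkey
            rw [if_pos hkey, hget, hp]
          · rw [if_neg (show ¬ (k' + 1 < xs.length ∧ pvLw xs (k' + 1) ∈ pvKey) from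
                fun hc => hkey hc.2)]
            unfold pvLw at hkey
            rw [hget] at hkey
            rw [if_neg hkey, hp]
        · -- run
          rw [pvKrun]
          unfold pvLw
          rw [hget, hr]
        · -- pending
          rw [pvPend]
          unfold pvLw
          rw [hget, hr, PySem.List.slice_from_neg_ofNat _ 4 (by norm_num)]
      · rw [hk', if_neg hs]
        simp only [Nat.add_sub_cancel]
        generalize hb : pvBest xs k' = b
        generalize hr : pvKrun xs (k' + 1) = r
        rw [pvStepB]
        show ((b : String),
              (if PySem.Str.lower (PySem.Str.strip xs[k' + 1]) ∈ pvKey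
               then r ++ [PySem.Str.strip xs[k' + 1]] else []),
              (if PySem.Str.lower (PySem.Str.strip xs[k' + 1]) ∈ pvTypes
               then some (PySem.Str.join " "
                 (PySem.List.slice r (some (-4)) none ++ [PySem.Str.strip xs[k' + 1]]))
               else none))
            = (pvBest xs (k' + 1), pvKrun xs (k' + 1 + 1), pvPend xs (k' + 1 + 1))
        rw [Prod.mk.injEq, Prod.mk.injEq]
        refine ⟨?_, ?_, ?_⟩
        · rw [pv_best_succ, if_neg hs, hb]
        · rw [pvKrun]
          unfold pvLw
          rw [hget, hr]
        · rw [pvPend]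
          unfold pvLw
          rw [hget, hr, PySem.List.slice_from_neg_ofNat _ 4 (by norm_num)]

-- ===== VERDICT (by name: the statement is the Claim_ definition above) =====
set_option maxRecDepth 8192 in
set_option maxHeartbeats 1000000 in
theorem classify_class_type_spec : Claim_equal_classify_class_type := by
  intro xs _
  unfold Spec_classify_class_type
  have hB0 := pv_inv xs xs.length le_rfl
  rw [List.take_length] at hB0
  have hBB : classify_class_type_alt xs
      = (match pvPend xs xs.length with
         | some p =>
             if PySem.Str.len (pvBest xs (xs.length - 1)) < PySem.Str.len p then p
             else pvBest xs (xs.length - 1)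
         | none => pvBest xs (xs.length - 1)) := by
    unfold classify_class_type_alt
    rw [hB0]
  have hA : ((xs.map fun t => PySem.Str.strip (PySem.Str.lower t)).zipIdx.filterMap
        (fun p => if p.1 ∈ pvTypes then some p.2 else none)) = pvPos xs xs.length := by
    rw [pv_pos_gen (fun t => PySem.Str.strip (PySem.Str.lower t)) (· ∈ pvTypes) xs 0]
    rw [show (fun (p : String × Nat) =>
          if PySem.Str.strip (PySem.Str.lower p.1) ∈ pvTypes then some p.2 else none)
        = (fun (p : String × Nat) =>
          if PySem.Str.lower (PySem.Str.strip p.1) ∈ pvTypes then some p.2 else none) from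
      funext fun p => by rw [pv_strip_lower]]
    exact pv_pos_eq xs
  have hAA : classify_class_type xs
      = (if pvPos xs xs.length = [] then ""
         else (pvPos xs xs.length).foldl (pvStepA xs) "") := by
    unfold classify_class_type
    simp only []
    rw [hA]
  rw [hAA, hBB]
  cases hxlen : xs.length with
  | zero => rfl
  | succ n =>
    simp only [Nat.add_sub_cancel]
    rw [show pvPend xs (n + 1)
        = if pvLw xs n ∈ pvTypes then some (pvP xs n) else none from rfl]
    by_cases hs : pvLw xs n ∈ pvTypes
    · rw [if_pos hs]
      have hne : pvPos xs (n + 1) ≠ [] := by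
        have hmem : n ∈ pvPos xs (n + 1) := by
          unfold pvPos
          rw [List.mem_filter, List.mem_range]
          exact ⟨by omega, by simpa using hs⟩
        exact List.ne_nil_of_mem hmem
      rw [if_neg hne]
      rw [show (pvPos xs (n + 1)).foldl (pvStepA xs) "" = pvBest xs (n + 1) from rfl]
      rw [pv_best_succ, if_pos hs, pv_stepA_char]
      rw [if_neg (show ¬ (n + 1 < xs.length ∧ pvLw xs (n + 1) ∈ pvKey) from
            fun hc => absurd hc.1 (by rw [hxlen]; omega))]
    · rw [if_neg hs]
      have hp : pvPos xs (n + 1) = pvPos xs n := by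
        unfold pvPos
        rw [List.range_succ, List.filter_append]
        simp [hs]
      rw [hp]
      by_cases h0 : pvPos xs n = []
      · rw [if_pos h0]
        rw [show pvBest xs n = (pvPos xs n).foldl (pvStepA xs) "" from rfl, h0]
        rfl
      · rw [if_neg h0]
        rfl
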